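-- pv_equiv track=rewrite | github.com/natanzt1/TextSummarization | summarization/src/summarization_function.py | function_kalimat_terpanjang
-- ===== SOURCE A (Python) =====
-- def function_kalimat_terpanjang(all_split_kalimat):
--     panjang_kalimat = []
--
--     for x in all_split_kalimat:
--         for y in x:
--             panjang_kalimat.append(len(y))
--
--     for y in range(1, len(panjang_kalimat)):
--         if panjang_kalimat[0] < panjang_kalimat[y]:
--             sample = panjang_kalimat[0]
--             panjang_kalimat[0] = panjang_kalimat[y]
--             panjang_kalimat[y] = sample
--
--     kalimat_terpanjang = panjang_kalimat[0]
--     return kalimat_terpanjang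
-- ===== SOURCE B (Python) =====
-- def function_kalimat_terpanjang(all_split_kalimat):
--     return max(len(y) for x in all_split_kalimat for y in x)
-- ===== Notes on version B (the rewrite author's own statement) =====
-- stated objective: simpler
-- what changed: Replaces building an explicit length list plus a bubble-swap selection pass with a single max() over a generator of the lengths.
import Mathlib
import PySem

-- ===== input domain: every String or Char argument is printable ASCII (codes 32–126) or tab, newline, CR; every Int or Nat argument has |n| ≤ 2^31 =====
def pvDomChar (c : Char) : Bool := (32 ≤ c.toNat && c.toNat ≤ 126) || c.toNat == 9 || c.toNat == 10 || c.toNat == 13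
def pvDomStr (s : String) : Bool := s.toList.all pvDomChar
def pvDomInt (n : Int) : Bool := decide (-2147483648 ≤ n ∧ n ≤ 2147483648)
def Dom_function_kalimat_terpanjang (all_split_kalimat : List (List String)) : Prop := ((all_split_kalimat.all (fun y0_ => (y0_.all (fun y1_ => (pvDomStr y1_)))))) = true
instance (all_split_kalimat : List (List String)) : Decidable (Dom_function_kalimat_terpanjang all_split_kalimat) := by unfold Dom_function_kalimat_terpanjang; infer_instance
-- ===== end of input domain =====

-- B replaces A's explicit length list + bubble-swap selection pass with a single max() over the lengths (simpler).

-- ===== PORT A =====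
-- one iteration of A's swap loop body: 'if panjang_kalimat[0] < panjang_kalimat[y]: swap'
def pvStepA (l : List Int) (y : Int) : List Int :=
  match PySem.List.pyGet? l 0, PySem.List.pyGet? l y with
  | some a, some b => if a < b then (l.set 0 b).set y.toNat a else l
  | _, _ => l

def function_kalimat_terpanjang (all_split_kalimat : List (List String)) : Int :=
  let panjang_kalimat : List Int :=
    all_split_kalimat.foldl
      (fun acc x => x.foldl (fun acc2 y => acc2 ++ [PySem.Str.len y]) acc) []
  let p2 := (PySem.List.pyRange 1 (panjang_kalimat.length : Int) 1).foldl pvStepA panjang_kalimat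
  -- panjang_kalimat[0]; none = IndexError (all inner lists empty), excluded by Pre_
  (PySem.List.pyGet? p2 0).getD 0

-- ===== PORT B =====
def function_kalimat_terpanjang_alt (all_split_kalimat : List (List String)) : Int :=
  -- max(len(y) for x in all_split_kalimat for y in x); none = ValueError (empty), excluded by Pre_
  (PySem.List.max? ((all_split_kalimat.flatMap (fun x => x)).map (fun y => PySem.Str.len y))
    (fun v => v)).getD 0

-- ===== PRECONDITION & SPEC =====
-- Pre_ excludes exactly the inputs whose inner lists are all empty: there A raises IndexError (and B raises ValueError).
def Pre_function_kalimat_terpanjang (all_split_kalimat : List (List String)) : Prop :=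
  all_split_kalimat.flatMap (fun x => x) ≠ []
instance (all_split_kalimat : List (List String)) : Decidable (Pre_function_kalimat_terpanjang all_split_kalimat) := by unfold Pre_function_kalimat_terpanjang; infer_instance

def pvWitness_function_kalimat_terpanjang : List (List String) := [["ab", "xyz"], [], ["c"]]

def Spec_function_kalimat_terpanjang (all_split_kalimat : List (List String)) (out : Int) : Prop := out = function_kalimat_terpanjang_alt all_split_kalimat
instance (all_split_kalimat : List (List String)) (out : Int) : Decidable (Spec_function_kalimat_terpanjang all_split_kalimat out) := by unfold Spec_function_kalimat_terpanjang; infer_instance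

-- ===== CLAIM (what is proved, stated in full; the proofs are below) =====
def Claim_equal_function_kalimat_terpanjang : Prop := ∀ (all_split_kalimat : List (List String)), Dom_function_kalimat_terpanjang all_split_kalimat → Pre_function_kalimat_terpanjang all_split_kalimat → Spec_function_kalimat_terpanjang all_split_kalimat (function_kalimat_terpanjang all_split_kalimat)

-- ===== LEMMAS AND PROOFS =====

-- A's flatten loop builds exactly the list of lengths, in order.
lemma pv_flatten_eq (xs : List (List String)) :
    xs.foldl (fun acc x => x.foldl (fun acc2 y => acc2 ++ [PySem.Str.len y]) acc) [] =
      (xs.flatMap (fun x => x)).map (fun y => PySem.Str.len y) := by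
  have h : xs.foldl (fun acc x => x.foldl (fun acc2 y => acc2 ++ [PySem.Str.len y]) acc) [] =
      xs.foldl (fun acc x => acc ++ x.map (fun y => PySem.Str.len y)) [] := by
    apply PySem.List.foldl_congr_mem
    intro acc x _
    exact PySem.List.foldl_append_singleton_eq_map PySem.Str.len x acc
  rw [h, PySem.List.foldl_append_eq_flatMap, List.map_flatMap]
  simp

lemma pv_set_append (u : List Int) (h a : Int) (t' : List Int) :
    (u ++ a :: t').set u.length h = u ++ h :: t' := by
  induction u with
  | nil => simp
  | cons b u ih => simp [List.set_cons_succ, ih]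

-- A's swap loop over indices s+1 … s+1+|t|-1 on the list h :: u ++ t (|u| = s) leaves
-- the running maximum of h and t at index 0.
lemma pv_loop_head : ∀ (t : List Int) (s : Nat) (h : Int) (u : List Int), u.length = s →
    ∃ r : List Int,
      (PySem.List.pyRange ((s : Int) + 1) ((s : Int) + 1 + t.length) 1).foldl pvStepA (h :: (u ++ t)) =
        (t.foldl max h) :: r := by
  intro t
  induction t with
  | nil =>
    intro s h u hu
    refine ⟨u, ?_⟩
    rw [PySem.List.pyRange_one_eq_nil (by simp)]
    simp
  | cons a t' ih =>
    intro s h u hu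
    have hcons : PySem.List.pyRange ((s : Int) + 1) ((s : Int) + 1 + (a :: t').length) 1 =
        ((s : Int) + 1) :: PySem.List.pyRange ((s : Int) + 1 + 1) ((s : Int) + 1 + (a :: t').length) 1 := by
      apply PySem.List.pyRange_one_cons
      simp only [List.length_cons]; push_cast; omega
    rw [hcons, List.foldl_cons]
    have hget0 : PySem.List.pyGet? (h :: (u ++ a :: t')) 0 = some h := by
      have h0 : (0 : Int) = ((0 : Nat) : Int) := rfl
      rw [h0, PySem.List.pyGet?_natCast]; rfl
    have hgety : PySem.List.pyGet? (h :: (u ++ a :: t')) ((s : Int) + 1) = some a := by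
      have h1 : ((s : Int) + 1) = ((s + 1 : Nat) : Int) := by push_cast; ring
      rw [h1, PySem.List.pyGet?_natCast]
      simp [hu]
    have hstep : pvStepA (h :: (u ++ a :: t')) ((s : Int) + 1) =
        (max h a) :: ((if h < a then u ++ [h] else u ++ [a]) ++ t') := by
      rw [pvStepA, hget0, hgety]
      by_cases hlt : h < a
      · simp only [hlt, if_true]
        have htn : ((s : Int) + 1).toNat = s + 1 := by omega
        rw [htn]
        rw [List.set_cons_zero, List.set_cons_succ]
        rw [← hu, pv_set_append]
        have : max h a = a := by omega
        simp [this]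
      · simp only [hlt, if_false]
        have : max h a = h := by omega
        simp [this]
    rw [hstep]
    have hlen : (if h < a then u ++ [h] else u ++ [a]).length = s + 1 := by
      by_cases hlt : h < a <;> simp [hlt, hu]
    obtain ⟨r, hr⟩ := ih (s + 1) (max h a) (if h < a then u ++ [h] else u ++ [a]) hlen
    refine ⟨r, ?_⟩
    have hrng : PySem.List.pyRange ((s : Int) + 1 + 1) ((s : Int) + 1 + (a :: t').length) 1 =
        PySem.List.pyRange (((s + 1 : Nat) : Int) + 1) (((s + 1 : Nat) : Int) + 1 + t'.length) 1 := by
      have e1 : (s : Int) + 1 + 1 = ((s + 1 : Nat) : Int) + 1 := by push_cast; ring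
      have e2 : (s : Int) + 1 + ((a :: t').length : Int) = ((s + 1 : Nat) : Int) + 1 + t'.length := by
        simp only [List.length_cons]; push_cast; ring
      rw [e1, e2]
    rw [hrng, hr]
    simp [List.foldl_cons]

-- ===== VERDICT (by name: the statement is the Claim_ definition above) =====
theorem function_kalimat_terpanjang_spec : Claim_equal_function_kalimat_terpanjang := by
  intro xs _ hpre
  unfold Spec_function_kalimat_terpanjang function_kalimat_terpanjang function_kalimat_terpanjang_alt
  rw [pv_flatten_eq]
  have hne : (xs.flatMap (fun x => x)).map (fun y => PySem.Str.len y) ≠ [] := by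
    simpa [Pre_function_kalimat_terpanjang] using hpre
  obtain ⟨h, t, hht⟩ := List.exists_cons_of_ne_nil hne
  rw [hht]
  obtain ⟨r, hr⟩ := pv_loop_head t 0 h [] rfl
  simp only [List.nil_append] at hr
  show (PySem.List.pyGet?
      ((PySem.List.pyRange 1 (((h :: t).length : Nat) : Int) 1).foldl pvStepA (h :: t)) 0).getD 0 =
    (PySem.List.max? (h :: t) (fun v => v)).getD 0
  have hrange : PySem.List.pyRange 1 (((h :: t).length : Nat) : Int) 1 =
      PySem.List.pyRange (((0 : Nat) : Int) + 1) (((0 : Nat) : Int) + 1 + t.length) 1 := by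
    congr 1
    simp only [List.length_cons]
    push_cast
    omega
  rw [hrange, hr, PySem.List.max?_id_cons]
  have h0 : (0 : Int) = ((0 : Nat) : Int) := rfl
  rw [h0, PySem.List.pyGet?_natCast]
  rfl
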